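-- pv_equiv track=rewrite | github.com/ricardovergarat/1-programacion | Zona/Ecuaciones/matrices.py | obtener_matrices_homogeneas
-- ===== SOURCE A (Python) =====
-- def obtener_matrices_homogeneas(matriz,a,b):
--     solucion_1 = []
--     solucion_2 = []
--     for i in range(len(matriz)):
--         fila_n_1 = []
--         fila_n_2 = []
--         for j in range(len(matriz[i])):
--             if i == j:
--                 fila_n_1.append(matriz[i][j] - a)
--                 fila_n_2.append(matriz[i][j] - b)
--             else:
--                 fila_n_1.append(matriz[i][j])
--                 fila_n_2.append(matriz[i][j])
--         solucion_1.append(fila_n_1)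
--         solucion_2.append(fila_n_2)
--     soluciones = [solucion_1,solucion_2]
--     return soluciones
-- ===== SOURCE B (Python) =====
-- def obtener_matrices_homogeneas(matriz, a, b):
--     # Linear-algebra view: each solution is M - c*I.  Build a shape-matched
--     # identity mask once (a unit vector shifted one slot per row; no index
--     # comparisons), then subtract each scalar by elementwise zip.
--     mask = []
--     zeros = []
--     for fila in matriz:
--         mask.append((zeros + [1] + [0] * len(fila))[:len(fila)])
--         zeros = zeros + [0]
--
--     def resta(c):
--         return [[x - c * e for x, e in zip(fila, mfila)]
--                 for fila, mfila in zip(matriz, mask)]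
--
--     return [resta(a), resta(b)]
-- ===== Notes on version B (the rewrite author's own statement) =====
-- stated objective: alternative
-- what changed: Recasts the task as the matrix difference M - c*I: B first builds a shape-matched identity mask (a unit vector shifted one slot per row, no index comparisons or i==j branch), then produces each solution by an elementwise zip subtraction of the scaled mask, instead of A's single nested indexed loop with a diagonal branch.
import Mathlib
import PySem

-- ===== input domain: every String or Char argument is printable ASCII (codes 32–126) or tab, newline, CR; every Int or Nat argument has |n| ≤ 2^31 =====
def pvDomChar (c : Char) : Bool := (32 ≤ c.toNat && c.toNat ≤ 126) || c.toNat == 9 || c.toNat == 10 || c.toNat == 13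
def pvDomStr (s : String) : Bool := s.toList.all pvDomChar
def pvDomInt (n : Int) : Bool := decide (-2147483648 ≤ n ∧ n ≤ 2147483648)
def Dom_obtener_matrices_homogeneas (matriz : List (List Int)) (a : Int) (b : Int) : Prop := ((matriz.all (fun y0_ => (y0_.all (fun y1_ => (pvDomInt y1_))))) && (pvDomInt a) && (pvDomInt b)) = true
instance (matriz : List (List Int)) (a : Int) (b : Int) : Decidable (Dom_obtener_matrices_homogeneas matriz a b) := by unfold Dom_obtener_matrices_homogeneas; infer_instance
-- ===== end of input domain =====

-- B views each solution as the matrix difference M - c·I: it builds a shape-matched identity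
-- mask once (a unit vector shifted one slot per row, no index comparisons) and subtracts each
-- scalar by elementwise zip; objective: alternative. Both programs are total.

-- ===== PORT A =====
-- inner loop of A: for j in range(len(matriz[i])): build fila_n_1 and fila_n_2 together
def pvRowA (fila : List Int) (a b : Int) (i j : Nat) : List Int × List Int :=
  match fila with
  | [] => ([], [])
  | x :: rest =>
    let r := pvRowA rest a b i (j + 1)
    if i = j then ((x - a) :: r.1, (x - b) :: r.2) else (x :: r.1, x :: r.2)

-- outer loop of A: for i in range(len(matriz)): append both rows to solucion_1/solucion_2
def pvOuterA (matriz : List (List Int)) (a b : Int) (i : Nat) : List (List Int) × List (List Int) :=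
  match matriz with
  | [] => ([], [])
  | fila :: rest =>
    let f := pvRowA fila a b i 0
    let s := pvOuterA rest a b (i + 1)
    (f.1 :: s.1, f.2 :: s.2)

def obtener_matrices_homogeneas (matriz : List (List Int)) (a : Int) (b : Int) : List (List (List Int)) :=
  let s := pvOuterA matriz a b 0
  [s.1, s.2]

-- ===== PORT B =====
-- Source B's mask loop: mask.append((zeros + [1] + [0]*len(fila))[:len(fila)]); zeros = zeros + [0]
-- (the slice [:len(fila)] has a non-negative bound, ported with PySem.List.slice)
def pvMaskB (matriz : List (List Int)) (zeros : List Int) : List (List Int) :=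
  match matriz with
  | [] => []
  | fila :: rest =>
    PySem.List.slice (zeros ++ [1] ++ List.replicate fila.length 0) none (some (fila.length : Int))
      :: pvMaskB rest (zeros ++ [0])

-- Source B's resta(c): [[x - c*e for x, e in zip(fila, mfila)] for fila, mfila in zip(matriz, mask)]
def pvRestaB (matriz mask : List (List Int)) (c : Int) : List (List Int) :=
  List.zipWith (fun fila mfila => List.zipWith (fun x e => x - c * e) fila mfila) matriz mask

def obtener_matrices_homogeneas_alt (matriz : List (List Int)) (a : Int) (b : Int) : List (List (List Int)) :=
  let mask := pvMaskB matriz []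
  [pvRestaB matriz mask a, pvRestaB matriz mask b]

-- ===== PRECONDITION & SPEC =====
def Spec_obtener_matrices_homogeneas (matriz : List (List Int)) (a : Int) (b : Int) (out : List (List (List Int))) : Prop := out = obtener_matrices_homogeneas_alt matriz a b
instance (matriz : List (List Int)) (a : Int) (b : Int) (out : List (List (List Int))) : Decidable (Spec_obtener_matrices_homogeneas matriz a b out) := by unfold Spec_obtener_matrices_homogeneas; infer_instance

-- ===== CLAIM (what is proved, stated in full; the proofs are below) =====
def Claim_equal_obtener_matrices_homogeneas : Prop := ∀ (matriz : List (List Int)) (a : Int) (b : Int), Dom_obtener_matrices_homogeneas matriz a b → Spec_obtener_matrices_homogeneas matriz a b (obtener_matrices_homogeneas matriz a b)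

-- ===== LEMMAS AND PROOFS =====

-- the adjusted row both programs produce: fila with c subtracted at position k (if present)
def pvAdj (fila : List Int) (c : Int) (k : Nat) : List Int :=
  if k < fila.length then fila.take k ++ [fila.getD k 0 - c] ++ fila.drop (k + 1) else fila

-- the whole adjusted matrix, starting at diagonal index i
def pvAdjAll (matriz : List (List Int)) (c : Int) (i : Nat) : List (List Int) :=
  match matriz with
  | [] => []
  | fila :: rest => pvAdj fila c i :: pvAdjAll rest c (i + 1)

lemma pvRowA_past (fila : List Int) (a b : Int) (i j : Nat) (h : i < j) :
    pvRowA fila a b i j = (fila, fila) := by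
  induction fila generalizing j with
  | nil => simp [pvRowA]
  | cons x rest ih =>
    simp [pvRowA, ih (j + 1) (by omega)]
    exact fun h2 => absurd h2 (by omega)

lemma pvRowA_eq (fila : List Int) (a b : Int) (i j : Nat) (hji : j ≤ i) :
    pvRowA fila a b i j = (pvAdj fila a (i - j), pvAdj fila b (i - j)) := by
  induction fila generalizing j with
  | nil => simp [pvRowA, pvAdj]
  | cons x rest ih =>
    by_cases hij : i = j
    · subst hij
      have h0 : i - i = 0 := by omega
      simp [pvRowA, pvAdj, List.getD, pvRowA_past rest a b i (i + 1) (by omega)]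
    · have hj1 : j + 1 ≤ i := by omega
      have hk : i - j = (i - (j + 1)) + 1 := by omega
      rw [pvRowA, ih (j + 1) hj1]
      simp only [hij, hk]
      unfold pvAdj
      by_cases hlt : i - (j + 1) < rest.length
      · simp [hlt, List.getD, Nat.succ_lt_succ hlt]
      · simp [hlt]

lemma pvOuterA_eq (matriz : List (List Int)) (a b : Int) (i : Nat) :
    pvOuterA matriz a b i = (pvAdjAll matriz a i, pvAdjAll matriz b i) := by
  induction matriz generalizing i with
  | nil => simp [pvOuterA, pvAdjAll]
  | cons fila rest ih =>
    rw [pvOuterA, ih, pvRowA_eq fila a b i 0 (by omega)]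
    simp [pvAdjAll]

-- zipping with zeros subtracts nothing: the row comes back (truncated to n)
lemma pvZipZero (l : List Int) (c : Int) (n : Nat) :
    List.zipWith (fun x e => x - c * e) l (List.replicate n (0 : Int)) = l.take n := by
  induction l generalizing n with
  | nil => simp
  | cons x xs ih =>
    cases n with
    | zero => simp
    | succ m => simp [List.replicate_succ, ih m]

-- one row of B: zipping fila against the truncated shifted unit vector equals pvAdj
lemma pvRowB (fila : List Int) (c : Int) (i m : Nat) (hm : fila.length ≤ m) :
    List.zipWith (fun x e => x - c * e) fila
      ((List.replicate i (0 : Int) ++ 1 :: List.replicate m 0).take fila.length)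
      = pvAdj fila c i := by
  induction fila generalizing i with
  | nil => simp [pvAdj]
  | cons x xs ih =>
    cases i with
    | zero =>
      have hx : xs.length ≤ m := by simpa using Nat.le_of_succ_le hm
      simp [pvAdj, List.take_replicate, Nat.min_eq_left hx, pvZipZero, List.getD]
    | succ k =>
      have hx : xs.length ≤ m := Nat.le_of_succ_le hm
      simp only [List.replicate_succ, List.cons_append, List.length_cons, List.take_succ_cons,
        List.zipWith_cons_cons, mul_zero, sub_zero]
      rw [ih k hx]
      unfold pvAdj
      by_cases hlt : k < xs.length
      · simp [Nat.succ_lt_succ hlt, hlt, List.getD]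
      · simp [hlt]

-- the matrix level of B: resta against the mask built from i leading zeros
lemma pvRestaB_eq (matriz : List (List Int)) (c : Int) (i : Nat) :
    pvRestaB matriz (pvMaskB matriz (List.replicate i 0)) c = pvAdjAll matriz c i := by
  induction matriz generalizing i with
  | nil => simp [pvRestaB, pvMaskB, pvAdjAll]
  | cons fila rest ih =>
    have hz : List.replicate i (0 : Int) ++ [0] = List.replicate (i + 1) 0 := by
      simp [List.replicate_succ']
    rw [pvMaskB, PySem.List.slice_to_natCast, hz]
    simp only [pvRestaB, List.zipWith_cons_cons, pvAdjAll, List.append_assoc,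
      List.singleton_append]
    rw [pvRowB fila c i fila.length (le_refl _)]
    exact congrArg _ (ih (i + 1))

-- ===== VERDICT (by name: the statement is the Claim_ definition above) =====
theorem obtener_matrices_homogeneas_spec : Claim_equal_obtener_matrices_homogeneas := by
  intro matriz a b _
  unfold Spec_obtener_matrices_homogeneas obtener_matrices_homogeneas obtener_matrices_homogeneas_alt
  rw [pvOuterA_eq]
  show [pvAdjAll matriz a 0, pvAdjAll matriz b 0]
      = [pvRestaB matriz (pvMaskB matriz []) a, pvRestaB matriz (pvMaskB matriz []) b]
  rw [show ([] : List Int) = List.replicate 0 0 from rfl, pvRestaB_eq, pvRestaB_eq]
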